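-- pv_equiv track=rewrite | github.com/SjJ1017/EPFL25_FDH_Universal_Aesthetics | poems/dataset.py | remove_separator_lines
-- ===== SOURCE A (Python) =====
-- sep_line = ' - - - '
--
-- def remove_separator_lines(poem_content: str) -> str:
--
--     lines = poem_content.split('\n')
--     filtered_lines = []
--     for line in lines:
--         if sep_line not in line:
--             filtered_lines.append(line)
--         else:
--             return '\n'.join(filtered_lines), True # stop at the first separator line
--     return '\n'.join(filtered_lines), False
-- ===== SOURCE B (Python) =====
-- sep_line = ' - - - '
--
-- def remove_separator_lines(poem_content: str) -> str:
--     pos = poem_content.find(sep_line)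
--     if pos == -1:
--         return poem_content, False
--     nl = poem_content.rfind('\n', 0, pos)
--     return ('' if nl == -1 else poem_content[:nl]), True
-- ===== Notes on version B (the rewrite author's own statement) =====
-- stated objective: idiomatic
-- what changed: A splits the text into lines and loops, accumulating lines until the first one containing ' - - - '; B does no line splitting at all: one substring find for the separator, one backward rfind for the preceding newline, and a single slice.
import Mathlib
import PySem

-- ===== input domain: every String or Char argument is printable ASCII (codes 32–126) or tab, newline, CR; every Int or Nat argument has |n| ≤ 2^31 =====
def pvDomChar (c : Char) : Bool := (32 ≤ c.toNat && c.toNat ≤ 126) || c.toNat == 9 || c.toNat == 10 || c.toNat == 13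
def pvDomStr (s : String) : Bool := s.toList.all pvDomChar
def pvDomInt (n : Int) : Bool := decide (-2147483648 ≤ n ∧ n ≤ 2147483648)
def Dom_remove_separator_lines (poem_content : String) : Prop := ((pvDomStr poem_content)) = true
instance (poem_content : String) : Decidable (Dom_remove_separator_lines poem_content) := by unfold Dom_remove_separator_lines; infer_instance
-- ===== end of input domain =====

-- B replaces A's split-into-lines-and-accumulate loop by a single substring search plus a
-- backward newline search and one slice (objective: idiomatic; same return value proved below).

-- ===== PORT A =====
-- sep_line = ' - - - '
def sepChars : List Char := [' ', '-', ' ', '-', ' ', '-', ' ']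

-- the for-loop over lines with the filtered_lines accumulator
def removeSepLoop : List (List Char) → List (List Char) → List Char × Bool
  | [], acc => (PySem.Chars.join ['\n'] acc, false)
  | line :: rest, acc =>
    if !(PySem.Chars.isIn sepChars line) then removeSepLoop rest (acc ++ [line])
    else (PySem.Chars.join ['\n'] acc, true)

def remove_separator_lines (poem_content : String) : String × Bool :=
  let lines := PySem.Chars.splitOn poem_content.toList ['\n']
  let r := removeSepLoop lines []
  (String.ofList r.1, r.2)

-- ===== PORT B =====
def remove_separator_lines_alt (poem_content : String) : String × Bool :=
  let cs := poem_content.toList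
  let pos := PySem.Chars.find cs sepChars
  if pos = -1 then (poem_content, false)
  else
    let nl := PySem.Chars.rfindFrom cs ['\n'] 0 (some pos)
    if nl = -1 then ("", true)
    else (String.ofList (PySem.Chars.slice cs none (some nl)), true)

-- ===== PRECONDITION & SPEC =====
def Spec_remove_separator_lines (poem_content : String) (out : String × Bool) : Prop := out = remove_separator_lines_alt poem_content
instance (poem_content : String) (out : String × Bool) : Decidable (Spec_remove_separator_lines poem_content out) := by unfold Spec_remove_separator_lines; infer_instance

-- ===== CLAIM (what is proved, stated in full; the proofs are below) =====
def Claim_equal_remove_separator_lines : Prop := ∀ (poem_content : String), Dom_remove_separator_lines poem_content → Spec_remove_separator_lines poem_content (remove_separator_lines poem_content)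

-- ===== LEMMAS AND PROOFS =====

-- reference form of B's character-level computation, used only in the proofs
def altC (cs : List Char) : List Char × Bool :=
  let pos := PySem.Chars.find cs sepChars
  if pos = -1 then (cs, false)
  else
    let nl := PySem.Chars.rfind (cs.take pos.toNat) ['\n']
    if nl = -1 then ([], true)
    else (cs.take nl.toNat, true)

lemma sep_no_nl : '\n' ∉ sepChars := by decide

lemma singleton_prefix_drop (c : Char) (w : List Char) (j : Nat) :
    [c] <+: w.drop j ↔ w[j]? = some c := by
  rw [← List.head?_drop]
  cases w.drop j <;> simp [List.prefix_cons_iff, eq_comm]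

lemma infix_iff_drop (sub s : List Char) : sub <:+: s ↔ ∃ j, sub <+: s.drop j := by
  rw [← PySem.Chars.isIn_iff_infix, ← PySem.Chars.exists_prefix_drop_iff_isIn]

lemma prefix_append_nl_iff (sep u v : List Char) (h : '\n' ∉ sep) :
    sep <+: u ++ '\n' :: v ↔ sep <+: u := by
  constructor
  · intro hp
    by_cases hl : sep.length ≤ u.length
    · have heq : sep = (u ++ '\n' :: v).take sep.length := by
        obtain ⟨t, ht⟩ := hp
        rw [← ht]; simp
      rw [List.take_append_of_le_length hl] at heq
      exact heq ▸ List.take_prefix _ _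
    · exfalso
      obtain ⟨t, ht⟩ := hp
      have hget : (sep ++ t)[u.length]? = some '\n' := by
        rw [ht]; simp
      rw [List.getElem?_append_left (by omega)] at hget
      exact h (List.mem_of_getElem? hget)
  · intro hp
    exact hp.trans (List.prefix_append u ('\n' :: v))

lemma infix_append_nl_iff (sep u v : List Char) (h : '\n' ∉ sep) :
    sep <:+: u ++ '\n' :: v ↔ sep <:+: u ∨ sep <:+: v := by
  simp only [infix_iff_drop]
  constructor
  · rintro ⟨j, hj⟩
    by_cases hju : j ≤ u.length
    · rw [List.drop_append_of_le_length hju, prefix_append_nl_iff _ _ _ h] at hj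
      exact Or.inl ⟨j, hj⟩
    · right
      refine ⟨j - u.length - 1, ?_⟩
      have : (u ++ '\n' :: v).drop j = v.drop (j - u.length - 1) := by
        rw [List.drop_append]
        have h1 : u.drop j = [] := List.drop_eq_nil_of_le (by omega)
        have h2 : j - u.length = (j - u.length - 1) + 1 := by omega
        rw [h1, h2]; simp
      rwa [this] at hj
  · rintro (⟨j, hj⟩ | ⟨j, hj⟩)
    · by_cases hju : j ≤ u.length
      · refine ⟨j, ?_⟩
        rw [List.drop_append_of_le_length hju, prefix_append_nl_iff _ _ _ h]
        exact hj
      · rw [List.drop_eq_nil_of_le (by omega)] at hj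
        have : sep = [] := List.prefix_nil.mp hj
        refine ⟨0, ?_⟩; simp [this]
    · refine ⟨u.length + 1 + j, ?_⟩
      have : (u ++ '\n' :: v).drop (u.length + 1 + j) = v.drop j := by
        rw [List.drop_append]
        rw [List.drop_eq_nil_of_le (by omega)]
        have : u.length + 1 + j - u.length = j + 1 := by omega
        rw [this]; simp
      rwa [this]
  
lemma find_eq_coe (s sub : List Char) (k : Nat) (h1 : sub <+: s.drop k)
    (h2 : ∀ i < k, ¬ sub <+: s.drop i) : PySem.Chars.find s sub = k := by
  have hinf : sub <:+: s := (infix_iff_drop sub s).mpr ⟨k, h1⟩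
  have h0 : 0 ≤ PySem.Chars.find s sub := (PySem.Chars.find_nonneg_iff s sub).mpr hinf
  obtain ⟨hp, hmin⟩ := PySem.Chars.find_spec h0
  set n := (PySem.Chars.find s sub).toNat with hn
  have : n = k := by
    rcases lt_trichotomy n k with h | h | h
    · exact absurd hp (h2 n h)
    · exact h
    · exact absurd h1 (hmin k h)
  omega

lemma rgo_pos (s : List Char) (k m : Nat) (hm : m ≤ k) (hp : s[m]? = some '\n')
    (hmax : ∀ j, m < j → j ≤ k → s[j]? ≠ some '\n') :
    PySem.Chars.rfind.go s ['\n'] k = m := by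
  induction k with
  | zero =>
    have : m = 0 := by omega
    subst this
    simp [PySem.Chars.rfind.go, List.isPrefixOf_iff_prefix]
    rw [show s = s.drop 0 by simp, singleton_prefix_drop]
    simpa using hp
  | succ k IH =>
    by_cases hmk : m = k + 1
    · subst hmk
      have : ['\n'] <+: s.drop (k+1) := (singleton_prefix_drop _ _ _).mpr hp
      simp [PySem.Chars.rfind.go, List.isPrefixOf_iff_prefix, this]
    · have hmk' : m ≤ k := by omega
      have hcond : ¬ (['\n'] <+: s.drop (k+1)) := by
        rw [singleton_prefix_drop]
        exact hmax (k+1) (by omega) (le_refl _)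
      simp [PySem.Chars.rfind.go, List.isPrefixOf_iff_prefix, hcond]
      exact IH hmk' (fun j h1 h2 => hmax j h1 (by omega))

lemma rgo_neg (s : List Char) (k : Nat) (h : ∀ j ≤ k, s[j]? ≠ some '\n') :
    PySem.Chars.rfind.go s ['\n'] k = -1 := by
  induction k with
  | zero =>
    have hcond : ¬ (['\n'] <+: s) := by
      rw [show s = s.drop 0 by simp, singleton_prefix_drop]
      exact h 0 (le_refl _)
    simp [PySem.Chars.rfind.go, List.isPrefixOf_iff_prefix]
    rw [show s = s.drop 0 by simp, singleton_prefix_drop]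
    simpa using h 0 (le_refl _)
  | succ k IH =>
    have hcond : ¬ (['\n'] <+: s.drop (k+1)) := by
      rw [singleton_prefix_drop]; exact h (k+1) (le_refl _)
    simp [PySem.Chars.rfind.go, List.isPrefixOf_iff_prefix, hcond]
    exact IH (fun j hj => h j (by omega))

lemma rfind_eq_neg (w : List Char) (h : '\n' ∉ w) : PySem.Chars.rfind w ['\n'] = -1 := by
  unfold PySem.Chars.rfind
  exact rgo_neg _ _ (fun j _ hj => h (List.mem_of_getElem? hj))

lemma rfind_mem_spec (w : List Char) (h : '\n' ∈ w) :
    ∃ m : Nat, PySem.Chars.rfind w ['\n'] = m ∧ w[m]? = some '\n' ∧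
      ∀ j, m < j → w[j]? ≠ some '\n' := by
  classical
  set P : Nat → Prop := fun j => w[j]? = some '\n' with hP
  have hex : ∃ i, i < w.length ∧ P i := by
    obtain ⟨i, hi, hget⟩ := List.mem_iff_getElem.mp h
    exact ⟨i, hi, by simp [hP, hget, List.getElem?_eq_getElem hi]⟩
  obtain ⟨i, hi, hPi⟩ := hex
  set m := Nat.findGreatest P w.length with hm
  have hPm : P m := Nat.findGreatest_spec (m := i) (by omega) hPi
  have hmb : m ≤ w.length := Nat.findGreatest_le _
  have hmax : ∀ j, m < j → ¬ P j := by
    intro j hj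
    by_cases hjb : j ≤ w.length
    · exact Nat.findGreatest_is_greatest hj hjb
    · intro hPj
      have : j < w.length := (List.getElem?_eq_some_iff.mp hPj).1
      omega
  refine ⟨m, ?_, hPm, hmax⟩
  unfold PySem.Chars.rfind
  exact rgo_pos _ _ _ hmb hPm (fun j h1 _ => hmax j h1)

lemma getElem?_append_nl (u v : List Char) (k : Nat) :
    (u ++ '\n' :: v)[u.length + 1 + k]? = v[k]? := by
  rw [show u ++ '\n' :: v = (u ++ ['\n']) ++ v by simp]
  rw [List.getElem?_append_right (by simp)]
  congr 1
  simp

lemma getElem?_append_nl_self (u v : List Char) :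
    (u ++ '\n' :: v)[u.length]? = some '\n' := by
  rw [List.getElem?_append_right (le_refl _)]
  simp

lemma rfind_append_nl (u v : List Char) :
    PySem.Chars.rfind (u ++ '\n' :: v) ['\n'] =
      if '\n' ∈ v then (u.length : Int) + 1 + PySem.Chars.rfind v ['\n'] else u.length := by
  by_cases hv : '\n' ∈ v
  · obtain ⟨m, hm, hget, hmax⟩ := rfind_mem_spec v hv
    have hmlen : m < v.length := (List.getElem?_eq_some_iff.mp hget).1
    rw [if_pos hv, hm]
    unfold PySem.Chars.rfind
    have : PySem.Chars.rfind.go (u ++ '\n' :: v) ['\n'] (u ++ '\n' :: v).length = ((u.length + 1 + m : Nat) : Int) := by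
      apply rgo_pos
      · simp; omega
      · rw [getElem?_append_nl]; exact hget
      · intro j h1 h2
        have hj : u.length + 1 ≤ j := by omega
        have : j = u.length + 1 + (j - u.length - 1) := by omega
        rw [this, getElem?_append_nl]
        exact hmax _ (by omega)
    rw [this]; push_cast; ring
  · rw [if_neg hv]
    unfold PySem.Chars.rfind
    apply rgo_pos
    · simp
    · exact getElem?_append_nl_self u v
    · intro j h1 h2
      have : j = u.length + 1 + (j - u.length - 1) := by omega
      rw [this, getElem?_append_nl]
      intro hc
      exact hv (List.mem_of_getElem? hc)

lemma rfind_nonneg_of_ne (w : List Char) (h : PySem.Chars.rfind w ['\n'] ≠ -1) :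
    0 ≤ PySem.Chars.rfind w ['\n'] := by
  by_cases hm : '\n' ∈ w
  · obtain ⟨m, hmv, _, _⟩ := rfind_mem_spec w hm
    omega
  · exact absurd (rfind_eq_neg w hm) h

lemma rfindFrom_zero_some (cs : List Char) (pos : Int) (h0 : 0 ≤ pos) (hl : pos ≤ cs.length) :
    PySem.Chars.rfindFrom cs ['\n'] 0 (some pos) = PySem.Chars.rfind (cs.take pos.toNat) ['\n'] := by
  unfold PySem.Chars.rfindFrom
  simp only [not_lt.mpr hl, if_false, not_lt.mpr h0]
  norm_num [not_lt.mpr hl, not_lt.mpr h0]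
  intro h
  omega


lemma sgo_acc (fuel : Nat) : ∀ (l cur : List Char) (acc : List (List Char)),
    PySem.Chars.splitOn.go ['\n'] fuel l cur acc = acc.reverse ++ PySem.Chars.splitOn.go ['\n'] fuel l cur [] := by
  induction fuel with
  | zero => intro l cur acc; simp [PySem.Chars.splitOn.go]
  | succ fuel IH =>
    intro l cur acc
    cases l with
    | nil => simp [PySem.Chars.splitOn.go]
    | cons c rest =>
      by_cases hc : (['\n'] : List Char).isPrefixOf (c :: rest) = true
      · simp only [PySem.Chars.splitOn.go, hc, if_true]
        rw [IH _ _ ((cur.reverse :: acc)), IH _ _ ([cur.reverse])]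
        simp
      · simp only [PySem.Chars.splitOn.go, hc, Bool.false_eq_true, if_false]
        rw [IH _ _ acc]

lemma sgo_nonl (l : List Char) (h : '\n' ∉ l) : ∀ (fuel : Nat) (cur : List Char) (acc : List (List Char)),
    l.length < fuel →
    PySem.Chars.splitOn.go ['\n'] fuel l cur acc = ((cur.reverse ++ l) :: acc).reverse := by
  induction l with
  | nil =>
    intro fuel cur acc hf
    obtain ⟨f, rfl⟩ : ∃ f, fuel = f + 1 := ⟨fuel - 1, by omega⟩
    simp [PySem.Chars.splitOn.go]
  | cons c rest IH =>
    intro fuel cur acc hf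
    obtain ⟨f, rfl⟩ : ∃ f, fuel = f + 1 := ⟨fuel - 1, by omega⟩
    have hcne : c ≠ '\n' := fun hx => h (hx ▸ List.mem_cons_self)
    have hc : ¬ ((['\n'] : List Char).isPrefixOf (c :: rest) = true) := by
      simp only [List.isPrefixOf_iff_prefix, List.prefix_cons_iff]
      push Not
      exact ⟨by simp, fun t ht _ => hcne (by injection ht with h1 _; exact h1.symm)⟩
    simp only [PySem.Chars.splitOn.go, hc, if_false]
    rw [IH (fun hm => h (List.mem_cons_of_mem _ hm)) f (c :: cur) acc (by simp at hf ⊢; omega)]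
    simp

lemma sgo_cons (l0 : List Char) (h : '\n' ∉ l0) : ∀ (fuel : Nat) (rest cur : List Char) (acc : List (List Char)),
    PySem.Chars.splitOn.go ['\n'] (fuel + l0.length + 1) (l0 ++ '\n' :: rest) cur acc =
      PySem.Chars.splitOn.go ['\n'] fuel rest [] ((cur.reverse ++ l0) :: acc) := by
  induction l0 with
  | nil =>
    intro fuel rest cur acc
    have hc : (['\n'] : List Char).isPrefixOf ('\n' :: rest) = true := by
      simp [List.isPrefixOf_iff_prefix, List.prefix_cons_iff]
    simp only [List.nil_append, List.length_nil, Nat.add_zero, PySem.Chars.splitOn.go, hc, if_true]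
    simp
  | cons c l0' IH =>
    intro fuel rest cur acc
    have hcne : c ≠ '\n' := fun hx => h (hx ▸ List.mem_cons_self)
    have hc : ¬ ((['\n'] : List Char).isPrefixOf (c :: (l0' ++ '\n' :: rest)) = true) := by
      simp only [List.isPrefixOf_iff_prefix, List.prefix_cons_iff]
      push Not
      exact ⟨by simp, fun t ht _ => hcne (by injection ht with h1 _; exact h1.symm)⟩
    have hlen : fuel + (c :: l0').length + 1 = (fuel + l0'.length + 1) + 1 := by simp; omega
    rw [hlen]
    simp only [List.cons_append, PySem.Chars.splitOn.go, hc, if_false]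
    rw [IH (fun hm => h (List.mem_cons_of_mem _ hm)) fuel rest (c :: cur) acc]
    simp

lemma splitOn_nonl (cs : List Char) (h : '\n' ∉ cs) : PySem.Chars.splitOn cs ['\n'] = [cs] := by
  unfold PySem.Chars.splitOn
  rw [sgo_nonl cs h _ _ _ (by omega)]
  simp

lemma splitOn_cons (l0 rest : List Char) (h : '\n' ∉ l0) :
    PySem.Chars.splitOn (l0 ++ '\n' :: rest) ['\n'] = l0 :: PySem.Chars.splitOn rest ['\n'] := by
  unfold PySem.Chars.splitOn
  have hlen : (l0 ++ '\n' :: rest).length + 1 = (rest.length + 1) + l0.length + 1 := by simp; omega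
  rw [hlen, sgo_cons l0 h, sgo_acc]
  simp

lemma join_cons_ne (x : List Char) (tl : List (List Char)) (h : tl ≠ []) :
    PySem.Chars.join ['\n'] (x :: tl) = x ++ '\n' :: PySem.Chars.join ['\n'] tl := by
  cases tl with
  | nil => exact absurd rfl h
  | cons y t =>
    rw [PySem.Chars.join_cons_cons]
    simp

lemma splitOn_props : ∀ (n : Nat) (cs : List Char), cs.length ≤ n →
    PySem.Chars.splitOn cs ['\n'] ≠ [] ∧ (∀ l ∈ PySem.Chars.splitOn cs ['\n'], '\n' ∉ l) ∧
      PySem.Chars.join ['\n'] (PySem.Chars.splitOn cs ['\n']) = cs := by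
  intro n
  induction n with
  | zero =>
    intro cs hl
    have : cs = [] := List.eq_nil_of_length_eq_zero (by omega)
    subst this
    rw [splitOn_nonl [] (by simp)]
    refine ⟨by simp, by simp, by simp [PySem.Chars.join_singleton]⟩
  | succ n IH =>
    intro cs hl
    cases hd : cs.dropWhile (fun c => !(c == '\n')) with
    | nil =>
      have hcs : cs.takeWhile (fun c => !(c == '\n')) = cs := by
        have := List.takeWhile_append_dropWhile (p := fun c => !(c == '\n')) (l := cs)
        rw [hd] at this; simpa using this
      have hnl : '\n' ∉ cs := by
        intro hm
        have := List.mem_takeWhile_imp (hcs ▸ hm)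
        simp at this
      rw [splitOn_nonl cs hnl]
      refine ⟨by simp, by simpa using hnl, by simp [PySem.Chars.join_singleton]⟩
    | cons d rest =>
      set l0 := cs.takeWhile (fun c => !(c == '\n')) with hl0
      have hnl0 : '\n' ∉ l0 := by
        intro hm
        have := List.mem_takeWhile_imp hm
        simp at this
      have hdn : d = '\n' := by
        have h2 : (cs.dropWhile (fun c => !(c == '\n'))).head? = some d := by rw [hd]; rfl
        have := List.head?_dropWhile_not (p := fun c => !(c == '\n')) (l := cs)
        rw [h2] at this
        simpa using this
      have hcs : cs = l0 ++ '\n' :: rest := by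
        have := List.takeWhile_append_dropWhile (p := fun c => !(c == '\n')) (l := cs)
        rw [hd, hdn] at this
        exact this.symm
      have hrl : rest.length ≤ n := by
        have : cs.length = l0.length + 1 + rest.length := by rw [hcs]; simp; omega
        omega
      obtain ⟨h1, h2, h3⟩ := IH rest hrl
      rw [hcs, splitOn_cons l0 rest hnl0]
      refine ⟨by simp, ?_, ?_⟩
      · intro l hml
        rcases List.mem_cons.mp hml with h | h
        · exact h ▸ hnl0
        · exact h2 l h
      · rw [join_cons_ne _ _ h1, h3]

lemma find_nl_left (u v : List Char) (hu : sepChars <:+: u) :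
    PySem.Chars.find (u ++ '\n' :: v) sepChars = PySem.Chars.find u sepChars := by
  have h0 : 0 ≤ PySem.Chars.find u sepChars := (PySem.Chars.find_nonneg_iff u sepChars).mpr hu
  obtain ⟨hp, hmin⟩ := PySem.Chars.find_spec h0
  set k := (PySem.Chars.find u sepChars).toNat with hk
  have hkl : k ≤ u.length := by
    have := PySem.Chars.find_le_length u sepChars
    omega
  have : PySem.Chars.find (u ++ '\n' :: v) sepChars = (k : Int) := by
    apply find_eq_coe
    · rw [List.drop_append_of_le_length hkl]
      exact hp.trans (List.prefix_append _ _)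
    · intro i hi
      rw [List.drop_append_of_le_length (by omega), prefix_append_nl_iff _ _ _ sep_no_nl]
      exact hmin i hi
  omega

lemma drop_append_nl (u v : List Char) (k : Nat) :
    (u ++ '\n' :: v).drop (u.length + 1 + k) = v.drop k := by
  rw [show u ++ '\n' :: v = (u ++ ['\n']) ++ v by simp, List.drop_append]
  rw [List.drop_eq_nil_of_le (by simp)]
  simp

lemma take_append_nl (u v : List Char) (k : Nat) :
    (u ++ '\n' :: v).take (u.length + 1 + k) = u ++ '\n' :: v.take k := by
  rw [show u ++ '\n' :: v = (u ++ ['\n']) ++ v by simp, List.take_append]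
  rw [List.take_of_length_le (by simp)]
  have hidx : u.length + 1 + k - (u ++ ['\n']).length = k := by simp
  rw [hidx]
  simp

lemma find_nl_right (u v : List Char) (hu : ¬ sepChars <:+: u) (hv : sepChars <:+: v) :
    PySem.Chars.find (u ++ '\n' :: v) sepChars = u.length + 1 + PySem.Chars.find v sepChars := by
  have h0 : 0 ≤ PySem.Chars.find v sepChars := (PySem.Chars.find_nonneg_iff v sepChars).mpr hv
  obtain ⟨hp, hmin⟩ := PySem.Chars.find_spec h0
  set k := (PySem.Chars.find v sepChars).toNat with hk
  have : PySem.Chars.find (u ++ '\n' :: v) sepChars = ((u.length + 1 + k : Nat) : Int) := by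
    apply find_eq_coe
    · rw [drop_append_nl]
      exact hp
    · intro i hi
      by_cases hiu : i ≤ u.length
      · rw [List.drop_append_of_le_length hiu, prefix_append_nl_iff _ _ _ sep_no_nl]
        intro hc
        exact hu ((infix_iff_drop _ _).mpr ⟨i, hc⟩)
      · have : i = u.length + 1 + (i - u.length - 1) := by omega
        rw [this, drop_append_nl]
        exact hmin _ (by omega)
  push_cast at this
  omega

lemma loop_acc_eq (lines : List (List Char)) : ∀ acc,
    removeSepLoop lines acc =
      (PySem.Chars.join ['\n'] (acc ++ lines.takeWhile (fun l => !PySem.Chars.isIn sepChars l)),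
       lines.any (fun l => PySem.Chars.isIn sepChars l)) := by
  induction lines with
  | nil => intro acc; simp [removeSepLoop]
  | cons l rest IH =>
    intro acc
    by_cases hl : PySem.Chars.isIn sepChars l = true
    · simp [removeSepLoop, hl, List.takeWhile_cons]
    · have hl' : PySem.Chars.isIn sepChars l = false := by
        cases h : PySem.Chars.isIn sepChars l
        · rfl
        · exact absurd h hl
      simp only [removeSepLoop, hl', Bool.not_false, if_true, List.takeWhile_cons, List.any_cons]
      rw [IH (acc ++ [l])]
      simp

lemma altC_eq (cs : List Char) : altC cs =
    if PySem.Chars.find cs sepChars = -1 then (cs, false)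
    else if PySem.Chars.rfind (cs.take (PySem.Chars.find cs sepChars).toNat) ['\n'] = -1 then ([], true)
    else (cs.take (PySem.Chars.rfind (cs.take (PySem.Chars.find cs sepChars).toNat) ['\n']).toNat, true) := rfl

lemma altC_nonl_in (h0 : List Char) (hh : '\n' ∉ h0) (hin : sepChars <:+: h0) :
    altC h0 = ([], true) := by
  have hpos : 0 ≤ PySem.Chars.find h0 sepChars := (PySem.Chars.find_nonneg_iff h0 sepChars).mpr hin
  have hne : ¬ (PySem.Chars.find h0 sepChars = -1) := by omega
  have hnl : PySem.Chars.rfind (h0.take (PySem.Chars.find h0 sepChars).toNat) ['\n'] = -1 :=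
    rfind_eq_neg _ (fun hm => hh (List.mem_of_mem_take hm))
  rw [altC_eq, if_neg hne, if_pos hnl]

lemma altC_in_line (h0 v : List Char) (hh : '\n' ∉ h0) (hin : sepChars <:+: h0) :
    altC (h0 ++ '\n' :: v) = ([], true) := by
  have hpos : 0 ≤ PySem.Chars.find h0 sepChars := (PySem.Chars.find_nonneg_iff h0 sepChars).mpr hin
  have hfl : PySem.Chars.find (h0 ++ '\n' :: v) sepChars = PySem.Chars.find h0 sepChars :=
    find_nl_left h0 v hin
  have hne : ¬ (PySem.Chars.find (h0 ++ '\n' :: v) sepChars = -1) := by rw [hfl]; omega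
  have hkle : (PySem.Chars.find (h0 ++ '\n' :: v) sepChars).toNat ≤ h0.length := by
    have := PySem.Chars.find_le_length h0 sepChars
    rw [hfl]; omega
  have hnl : PySem.Chars.rfind ((h0 ++ '\n' :: v).take (PySem.Chars.find (h0 ++ '\n' :: v) sepChars).toNat) ['\n'] = -1 := by
    rw [List.take_append_of_le_length hkle]
    exact rfind_eq_neg _ (fun hm => hh (List.mem_of_mem_take hm))
  rw [altC_eq, if_neg hne, if_pos hnl]

lemma main_lines : ∀ (lines : List (List Char)), lines ≠ [] → (∀ l ∈ lines, '\n' ∉ l) →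
    altC (PySem.Chars.join ['\n'] lines) = removeSepLoop lines [] := by
  intro lines
  induction lines with
  | nil => intro h _; exact absurd rfl h
  | cons h0 t IH =>
    intro _ hfree
    have hh : '\n' ∉ h0 := hfree h0 List.mem_cons_self
    cases t with
    | nil =>
      rw [PySem.Chars.join_singleton]
      by_cases hin : sepChars <:+: h0
      · rw [altC_nonl_in h0 hh hin]
        have hisin : PySem.Chars.isIn sepChars h0 = true := (PySem.Chars.isIn_iff_infix _ _).mpr hin
        simp [removeSepLoop, hisin, PySem.Chars.join_nil]
      · have hfneg : PySem.Chars.find h0 sepChars = -1 := (PySem.Chars.find_eq_neg_one_iff _ _).mpr hin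
        have hisin : PySem.Chars.isIn sepChars h0 = false := (PySem.Chars.isIn_eq_false_iff _ _).mpr hin
        rw [altC_eq, if_pos hfneg]
        simp [removeSepLoop, hisin, PySem.Chars.join_singleton]
    | cons t0 t' =>
      have htne : (t0 :: t') ≠ [] := by simp
      have hfree' : ∀ l ∈ t0 :: t', '\n' ∉ l := fun l hl => hfree l (List.mem_cons_of_mem _ hl)
      have IH' := IH htne hfree'
      have ht0 : '\n' ∉ t0 := hfree' t0 List.mem_cons_self
      set v := PySem.Chars.join ['\n'] (t0 :: t') with hv
      have hjoin : PySem.Chars.join ['\n'] (h0 :: t0 :: t') = h0 ++ '\n' :: v := by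
        rw [hv]; exact join_cons_ne h0 (t0 :: t') htne
      rw [hjoin, loop_acc_eq, List.nil_append]
      rw [loop_acc_eq, List.nil_append] at IH'
      by_cases hin : sepChars <:+: h0
      · rw [altC_in_line h0 v hh hin]
        have hisin : PySem.Chars.isIn sepChars h0 = true := (PySem.Chars.isIn_iff_infix _ _).mpr hin
        simp [List.takeWhile_cons, hisin, PySem.Chars.join_nil, List.any_cons]
      · have hisin : PySem.Chars.isIn sepChars h0 = false := (PySem.Chars.isIn_eq_false_iff _ _).mpr hin
        by_cases hv' : sepChars <:+: v
        · -- the first separator line lies in v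
          have hfv : 0 ≤ PySem.Chars.find v sepChars := (PySem.Chars.find_nonneg_iff _ _).mpr hv'
          set kv := (PySem.Chars.find v sepChars).toNat with hkv
          have hfind : PySem.Chars.find (h0 ++ '\n' :: v) sepChars = ((h0.length + 1 + kv : Nat) : Int) := by
            rw [find_nl_right h0 v hin hv']
            push_cast
            omega
          have hne : ¬ (PySem.Chars.find (h0 ++ '\n' :: v) sepChars = -1) := by rw [hfind]; omega
          have htoNat : (PySem.Chars.find (h0 ++ '\n' :: v) sepChars).toNat = h0.length + 1 + kv := by
            rw [hfind]; omega
          rw [altC_eq, if_neg hne, htoNat, take_append_nl]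
          have hfvne : ¬ (PySem.Chars.find v sepChars = -1) := by omega
          rw [altC_eq, if_neg hfvne, ← hkv] at IH'
          rw [rfind_append_nl h0 (v.take kv)]
          by_cases hwnl : '\n' ∈ v.take kv
          · -- there is a newline before the separator occurrence inside v
            obtain ⟨m, hm, hget, hmax⟩ := rfind_mem_spec (v.take kv) hwnl
            have hrne : ¬ (PySem.Chars.rfind (v.take kv) ['\n'] = -1) := by omega
            rw [if_neg hrne, hm] at IH'
            have hmn : ((m : Int)).toNat = m := by omega
            rw [hmn] at IH'
            rw [if_pos hwnl, hm]
            have hnlne : ¬ (((h0.length : Int) + 1 + (m : Int)) = -1) := by omega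
            rw [if_neg hnlne]
            have htn2 : ((h0.length : Int) + 1 + (m : Int)).toNat = h0.length + 1 + m := by omega
            rw [htn2, take_append_nl]
            have ht0n : ¬ sepChars <:+: t0 := by
              intro hsep
              refine absurd hwnl ?_
              cases t' with
              | nil =>
                have hveq : v = t0 := by rw [hv, PySem.Chars.join_singleton]
                rw [hveq]
                exact fun hmem => absurd (List.mem_of_mem_take hmem) ht0
              | cons s1 s2 =>
                have hvdec : v = t0 ++ '\n' :: PySem.Chars.join ['\n'] (s1 :: s2) := by
                  rw [hv]; exact join_cons_ne t0 (s1 :: s2) (by simp)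
                have hft : PySem.Chars.find v sepChars = PySem.Chars.find t0 sepChars := by
                  rw [hvdec]; exact find_nl_left _ _ hsep
                have h0t : 0 ≤ PySem.Chars.find t0 sepChars := (PySem.Chars.find_nonneg_iff _ _).mpr hsep
                have hkle : kv ≤ t0.length := by
                  have := PySem.Chars.find_le_length t0 sepChars
                  rw [hkv, hft]; omega
                rw [hvdec, List.take_append_of_le_length hkle]
                exact fun hmem => absurd (List.mem_of_mem_take hmem) ht0
            have ht0b : (!PySem.Chars.isIn sepChars t0) = true := by
              simp [(PySem.Chars.isIn_eq_false_iff _ _).mpr ht0n]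
            rw [List.takeWhile_cons, if_pos (by simp [hisin])]
            have htwne : (t0 :: t').takeWhile (fun l => !PySem.Chars.isIn sepChars l) ≠ [] := by
              rw [List.takeWhile_cons, if_pos ht0b]; simp
            rw [join_cons_ne _ _ htwne]
            have hfst := congrArg Prod.fst IH'
            have hsnd := congrArg Prod.snd IH'
            simp only at hfst hsnd
            rw [List.any_cons, hisin, ← hfst, ← hsnd]
            simp
          · -- no newline before the separator occurrence: it is in the first line of v
            rw [if_neg hwnl]
            have hne2 : ¬ ((h0.length : Int) = -1) := by omega
            rw [if_neg hne2]
            have htn3 : ((h0.length : Int)).toNat = h0.length := by omega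
            have htk : (h0 ++ '\n' :: v).take h0.length = h0 := by
              rw [List.take_append_of_le_length (le_refl _), List.take_length]
            rw [htn3, htk]
            have ht0y : sepChars <:+: t0 := by
              by_contra hns
              cases t' with
              | nil =>
                have hveq : v = t0 := by rw [hv, PySem.Chars.join_singleton]
                exact hns (hveq ▸ hv')
              | cons s1 s2 =>
                have hvdec : v = t0 ++ '\n' :: PySem.Chars.join ['\n'] (s1 :: s2) := by
                  rw [hv]; exact join_cons_ne t0 (s1 :: s2) (by simp)
                have hsv' : sepChars <:+: PySem.Chars.join ['\n'] (s1 :: s2) := by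
                  have := hv'
                  rw [hvdec, infix_append_nl_iff _ _ _ sep_no_nl] at this
                  tauto
                have h0s : 0 ≤ PySem.Chars.find (PySem.Chars.join ['\n'] (s1 :: s2)) sepChars :=
                  (PySem.Chars.find_nonneg_iff _ _).mpr hsv'
                have hfr : PySem.Chars.find v sepChars =
                    t0.length + 1 + PySem.Chars.find (PySem.Chars.join ['\n'] (s1 :: s2)) sepChars := by
                  rw [hvdec]; exact find_nl_right _ _ hns hsv'
                have hkv2 : kv = t0.length + 1 + (PySem.Chars.find (PySem.Chars.join ['\n'] (s1 :: s2)) sepChars).toNat := by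
                  rw [hkv, hfr]; omega
                apply hwnl
                rw [hvdec, hkv2, take_append_nl]
                exact List.mem_append_right _ List.mem_cons_self
            have hist0 : PySem.Chars.isIn sepChars t0 = true := (PySem.Chars.isIn_iff_infix _ _).mpr ht0y
            rw [List.takeWhile_cons, if_pos (by simp [hisin]), List.takeWhile_cons, if_neg (by simp [hist0])]
            rw [PySem.Chars.join_singleton]
            simp [List.any_cons, hist0]
        · -- no separator line at all
          have hfcs : PySem.Chars.find (h0 ++ '\n' :: v) sepChars = -1 := by
            apply (PySem.Chars.find_eq_neg_one_iff _ _).mpr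
            intro hc
            rcases (infix_append_nl_iff _ _ _ sep_no_nl).mp hc with h | h
            · exact hin h
            · exact hv' h
          rw [altC_eq, if_pos hfcs]
          rw [altC_eq, if_pos ((PySem.Chars.find_eq_neg_one_iff _ _).mpr hv')] at IH'
          have hfst := congrArg Prod.fst IH'
          have hsnd := congrArg Prod.snd IH'
          simp only at hfst hsnd
          have ht0f : PySem.Chars.isIn sepChars t0 = false := by
            have h2 := hsnd.symm
            rw [List.any_cons] at h2
            simp at h2
            exact h2.1
          rw [List.takeWhile_cons, if_pos (by simp [hisin])]
          have htwne : (t0 :: t').takeWhile (fun l => !PySem.Chars.isIn sepChars l) ≠ [] := by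
            rw [List.takeWhile_cons, if_pos (by simp [ht0f])]; simp
          rw [join_cons_ne _ _ htwne, List.any_cons, hisin, ← hfst, ← hsnd]
          simp

lemma main_chars (cs : List Char) : altC cs = removeSepLoop (PySem.Chars.splitOn cs ['\n']) [] := by
  obtain ⟨h1, h2, h3⟩ := splitOn_props cs.length cs (le_refl _)
  have := main_lines _ h1 h2
  rwa [h3] at this


lemma final_eq (s : String) : remove_separator_lines s = remove_separator_lines_alt s := by
  show (String.ofList (removeSepLoop (PySem.Chars.splitOn s.toList ['\n']) []).1,
        (removeSepLoop (PySem.Chars.splitOn s.toList ['\n']) []).2) =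
       remove_separator_lines_alt s
  rw [← main_chars s.toList, altC_eq]
  show _ = (if PySem.Chars.find s.toList sepChars = -1 then (s, false)
    else if PySem.Chars.rfindFrom s.toList ['\n'] 0 (some (PySem.Chars.find s.toList sepChars)) = -1 then ("", true)
    else (String.ofList (PySem.Chars.slice s.toList none
      (some (PySem.Chars.rfindFrom s.toList ['\n'] 0 (some (PySem.Chars.find s.toList sepChars))))), true))
  by_cases hpos : PySem.Chars.find s.toList sepChars = -1
  · simp [hpos, String.ofList_toList]
  · have h0 : 0 ≤ PySem.Chars.find s.toList sepChars := by
      have := PySem.Chars.neg_one_le_find s.toList sepChars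
      omega
    have hle : PySem.Chars.find s.toList sepChars ≤ (s.toList.length : Int) :=
      PySem.Chars.find_le_length _ _
    rw [if_neg hpos, if_neg hpos, rfindFrom_zero_some _ _ h0 hle]
    by_cases hnl : PySem.Chars.rfind (s.toList.take (PySem.Chars.find s.toList sepChars).toNat) ['\n'] = -1
    · simp only [if_pos hnl]
    · have hnl0 : 0 ≤ PySem.Chars.rfind (s.toList.take (PySem.Chars.find s.toList sepChars).toNat) ['\n'] :=
        rfind_nonneg_of_ne _ hnl
      simp only [if_neg hnl, PySem.Chars.slice_eq_listSlice, PySem.List.slice_to _ hnl0]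

-- ===== VERDICT (by name: the statement is the Claim_ definition above) =====
theorem remove_separator_lines_spec : Claim_equal_remove_separator_lines := by
  intro s _
  unfold Spec_remove_separator_lines
  exact final_eq s
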